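-- pv_equiv track=rewrite | github.com/walkerlala/GC | classifier/src/cn/lasagna/www/classifier/svm-SF/test/xsquare_preprocess.py | _cal_ABCD
-- ===== SOURCE A (Python) =====
-- def _cal_ABCD(all_tuples, word, tag):
--     """ 计算卡方值的辅助函数 """
--     A, B, C, D = 0, 0, 0, 0
--     for t, ws in all_tuples:
--         if t == tag and word in ws:
--             A += 1
--         elif t != tag and word in ws:
--             B += 1
--         elif t == tag and word not in ws:
--             C += 1
--         elif t != tag and word not in ws:
--             D += 1
--         else:
--             raise Exceptioin("FATAL! logical BUG!")
--     return (A, B, C, D)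
-- ===== SOURCE B (Python) =====
-- def _cal_ABCD(all_tuples, word, tag):
--     """Staged passes: split the rows by whether they contain word, then count tags."""
--     present = [t for t, ws in all_tuples if word in ws]
--     absent = [t for t, ws in all_tuples if word not in ws]
--     A = present.count(tag)
--     C = absent.count(tag)
--     return (A, len(present) - A, C, len(absent) - C)
-- ===== Notes on version B (the rewrite author's own statement) =====
-- stated objective: alternative
-- what changed: Replaces the single loop with a four-way branch by staged passes: split the rows into those containing the word and those not, then obtain the four cells from list counts of the tag and the partition sizes.
import Mathlib
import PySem

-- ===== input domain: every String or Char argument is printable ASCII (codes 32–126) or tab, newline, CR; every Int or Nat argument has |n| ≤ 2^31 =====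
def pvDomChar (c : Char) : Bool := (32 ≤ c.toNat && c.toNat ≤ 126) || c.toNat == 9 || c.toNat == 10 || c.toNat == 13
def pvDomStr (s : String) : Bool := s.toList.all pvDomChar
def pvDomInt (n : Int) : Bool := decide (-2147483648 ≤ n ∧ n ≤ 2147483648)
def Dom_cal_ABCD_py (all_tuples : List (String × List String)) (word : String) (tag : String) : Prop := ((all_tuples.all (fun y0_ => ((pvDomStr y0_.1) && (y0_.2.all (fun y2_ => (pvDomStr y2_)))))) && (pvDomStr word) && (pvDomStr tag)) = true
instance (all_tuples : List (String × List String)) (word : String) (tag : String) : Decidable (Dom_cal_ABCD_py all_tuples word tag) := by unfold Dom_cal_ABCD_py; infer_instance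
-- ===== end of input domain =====

-- ===== PORT A =====
-- B replaces A's single four-way-branch loop by staged passes (partition by containment,
-- then tag counts); an alternative decomposition, not claimed faster.
-- Step of A's loop: the four-way elif chain (Python's final 'else' is logically unreachable).
def stepA (word tag : String) (acc : Int × Int × Int × Int) (p : String × List String) : Int × Int × Int × Int :=
  let A := acc.1; let B := acc.2.1; let C := acc.2.2.1; let D := acc.2.2.2
  if p.1 == tag && p.2.contains word then (A+1, B, C, D)
  else if p.1 != tag && p.2.contains word then (A, B+1, C, D)
  else if p.1 == tag && !(p.2.contains word) then (A, B, C+1, D)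
  else if p.1 != tag && !(p.2.contains word) then (A, B, C, D+1)
  else acc  -- Python raises here; unreachable since the four branches are exhaustive

def cal_ABCD_py (all_tuples : List (String × List String)) (word : String) (tag : String) : Int × Int × Int × Int :=
  all_tuples.foldl (stepA word tag) (0, 0, 0, 0)

-- ===== PORT B =====
def cal_ABCD_py_alt (all_tuples : List (String × List String)) (word : String) (tag : String) : Int × Int × Int × Int :=
  let present := (all_tuples.filter (fun p => p.2.contains word)).map Prod.fst
  let absent := (all_tuples.filter (fun p => !(p.2.contains word))).map Prod.fst
  let A : Int := (PySem.List.count present tag : Int)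
  let C : Int := (PySem.List.count absent tag : Int)
  (A, (present.length : Int) - A, C, (absent.length : Int) - C)

-- ===== PRECONDITION & SPEC =====
def Spec_cal_ABCD_py (all_tuples : List (String × List String)) (word : String) (tag : String) (out : Int × Int × Int × Int) : Prop := out = cal_ABCD_py_alt all_tuples word tag
instance (all_tuples : List (String × List String)) (word : String) (tag : String) (out : Int × Int × Int × Int) : Decidable (Spec_cal_ABCD_py all_tuples word tag out) := by unfold Spec_cal_ABCD_py; infer_instance

-- ===== CLAIM (what is proved, stated in full; the proofs are below) =====
def Claim_equal_cal_ABCD_py : Prop := ∀ (all_tuples : List (String × List String)) (word : String) (tag : String), Dom_cal_ABCD_py all_tuples word tag → Spec_cal_ABCD_py all_tuples word tag (cal_ABCD_py all_tuples word tag)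

-- ===== LEMMAS AND PROOFS =====
-- A's fold, from any start, adds the four branch counts componentwise.
theorem foldA_char (word tag : String) (l : List (String × List String)) :
    ∀ (A B C D : Int), l.foldl (stepA word tag) (A, B, C, D) =
      (A + (l.countP (fun p => p.1 == tag && p.2.contains word) : Int),
       B + (l.countP (fun p => !(p.1 == tag) && p.2.contains word) : Int),
       C + (l.countP (fun p => p.1 == tag && !(p.2.contains word)) : Int),
       D + (l.countP (fun p => !(p.1 == tag) && !(p.2.contains word)) : Int)) := by
  induction l with
  | nil => intro A B C D; simp [List.foldl]
  | cons p rest ih =>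
    intro A B C D
    simp only [List.foldl, List.countP_cons]
    cases ht : (p.1 == tag) <;> cases hw : (p.2.contains word) <;>
      simp only [stepA, ht, hw, bne, Bool.and_true, Bool.and_false, Bool.not_true,
        Bool.not_false, if_pos] <;>
      rw [ih] <;> simp <;> ring_nf

-- splitting a count by a second boolean predicate
theorem countP_split {α : Type} (l : List α) (p q : α → Bool) :
    l.countP p = l.countP (fun a => q a && p a) + l.countP (fun a => !(q a) && p a) := by
  induction l with
  | nil => simp
  | cons x xs ih =>
    simp only [List.countP_cons]
    cases hq : q x <;> cases hp : p x <;> simp [ih] <;> omega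

theorem cal_ABCD_py_spec : Claim_equal_cal_ABCD_py := by
  intro all_tuples word tag _
  unfold Spec_cal_ABCD_py cal_ABCD_py cal_ABCD_py_alt
  rw [foldA_char]
  simp only [PySem.List.count, List.count_eq_countP, List.countP_filter,
    List.length_map, ← List.countP_eq_length_filter, List.countP_map]
  have hw : all_tuples.countP (fun p => p.2.contains word) =
      all_tuples.countP (fun p => p.1 == tag && p.2.contains word) +
      all_tuples.countP (fun p => !(p.1 == tag) && p.2.contains word) :=
    countP_split all_tuples _ (fun p : String × List String => p.1 == tag)
  have hnw : all_tuples.countP (fun p => !(p.2.contains word)) =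
      all_tuples.countP (fun p => p.1 == tag && !(p.2.contains word)) +
      all_tuples.countP (fun p => !(p.1 == tag) && !(p.2.contains word)) :=
    countP_split all_tuples _ (fun p : String × List String => p.1 == tag)
  simp only [List.contains_eq_mem] at hw hnw ⊢
  refine Prod.ext ?_ (Prod.ext ?_ (Prod.ext ?_ ?_)) <;> simp [hw, hnw]
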